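-- pv_equiv track=rewrite | github.com/clemvg/AdventOfCode | tasks/day_5_the_cafetaria.py | part1
-- ===== SOURCE A (Python) =====
-- from typing import List
--
-- def part1(product_ranges: List[tuple], products: List[int]) -> int:
--     """
--     For each element in products, check if it falls within any of the product_ranges.
--     Returns the count of products that are within any range.
--     """
--     count = 0
--     for elem in products:
--         for start, end in product_ranges:
--             if start <= elem <= end:
--                 count += 1
--                 break
--     return count
-- ===== SOURCE B (Python) =====
-- def part1(product_ranges, products):
--     # Sort ranges by start, merge overlapping/contained ones once,
--     # then test each product against the merged disjoint intervals.
--     merged = []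
--     for s, e in sorted(product_ranges, key=lambda r: r[0]):
--         if merged and s <= merged[-1][1]:
--             if merged[-1][1] < e:
--                 merged[-1] = (merged[-1][0], e)
--         else:
--             merged.append((s, e))
--     return sum(1 for x in products if any(s <= x <= e for s, e in merged))
-- ===== Notes on version B (the rewrite author's own statement) =====
-- stated objective: faster
-- what changed: B sorts the ranges by start and coalesces them once into disjoint intervals, then counts products against the (usually much smaller) merged list, instead of A's scan over every range for every product.
import Mathlib
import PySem

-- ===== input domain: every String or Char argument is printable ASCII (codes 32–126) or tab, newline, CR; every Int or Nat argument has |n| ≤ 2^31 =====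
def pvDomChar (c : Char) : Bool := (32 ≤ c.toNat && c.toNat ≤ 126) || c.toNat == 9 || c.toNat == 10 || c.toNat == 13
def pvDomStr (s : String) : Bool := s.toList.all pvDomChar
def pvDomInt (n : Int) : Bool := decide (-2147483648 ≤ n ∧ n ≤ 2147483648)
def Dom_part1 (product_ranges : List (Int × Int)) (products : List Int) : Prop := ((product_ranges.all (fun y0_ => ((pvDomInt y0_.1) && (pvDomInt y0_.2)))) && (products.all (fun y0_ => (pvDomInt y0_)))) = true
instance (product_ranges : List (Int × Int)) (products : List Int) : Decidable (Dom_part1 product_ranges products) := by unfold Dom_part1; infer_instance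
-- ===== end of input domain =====

-- B merges the ranges once (sort by start, coalesce overlaps) and tests each product
-- against the merged intervals, instead of A's scan of every range per product.

-- ===== PORT A =====
-- inner 'for start, end …: if …: count += 1; break' — returns the increment (1 on first hit, else 0)
def part1Inner (product_ranges : List (Int × Int)) (elem : Int) : Int :=
  match product_ranges with
  | [] => 0
  | (s, e) :: rest => if s ≤ elem ∧ elem ≤ e then 1 else part1Inner rest elem

def part1 (product_ranges : List (Int × Int)) (products : List Int) : Int :=
  products.foldl (fun count elem => count + part1Inner product_ranges elem) 0

-- ===== PORT B =====
-- one iteration of the merge loop: coalesce r into the last merged interval or append it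
def mergeStep (merged : List (Int × Int)) (r : Int × Int) : List (Int × Int) :=
  match merged.getLast? with
  | some last =>
      if r.1 ≤ last.2 then
        (if last.2 < r.2 then merged.dropLast ++ [(last.1, r.2)] else merged)
      else merged ++ [r]
  | none => [r]

def part1_alt (product_ranges : List (Int × Int)) (products : List Int) : Int :=
  let merged := (PySem.List.sorted product_ranges (fun r => r.1) false).foldl mergeStep []
  products.foldl
    (fun acc x => acc + (if merged.any (fun r => decide (r.1 ≤ x ∧ x ≤ r.2)) then 1 else 0)) 0

-- ===== PRECONDITION & SPEC =====
def Spec_part1 (product_ranges : List (Int × Int)) (products : List Int) (out : Int) : Prop := out = part1_alt product_ranges products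
instance (product_ranges : List (Int × Int)) (products : List Int) (out : Int) : Decidable (Spec_part1 product_ranges products out) := by unfold Spec_part1; infer_instance

-- ===== CLAIM (what is proved, stated in full; the proofs are below) =====
def Claim_equal_part1 : Prop := ∀ (product_ranges : List (Int × Int)) (products : List Int), Dom_part1 product_ranges products → Spec_part1 product_ranges products (part1 product_ranges products)

-- ===== LEMMAS AND PROOFS =====

-- membership test of x in the union of a list of closed intervals
def hitB (x : Int) (r : Int × Int) : Bool := decide (r.1 ≤ x ∧ x ≤ r.2)

lemma part1Inner_eq (l : List (Int × Int)) (x : Int) :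
    part1Inner l x = if l.any (hitB x) then 1 else 0 := by
  induction l with
  | nil => simp [part1Inner]
  | cons r t ih =>
    obtain ⟨s, e⟩ := r
    rcases Decidable.em (s ≤ x ∧ x ≤ e) with h | h
    · simp [part1Inner, hitB, h]
    · have hd : (decide (s ≤ x ∧ x ≤ e)) = false := decide_eq_false h
      simp only [part1Inner, List.any_cons, hitB, hd, Bool.false_or, if_neg h, ih]

lemma mergeStep_nil (r : Int × Int) : mergeStep [] r = [r] := rfl

lemma mergeStep_concat (init : List (Int × Int)) (last r : Int × Int) :
    mergeStep (init ++ [last]) r =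
      if r.1 ≤ last.2 then
        (if last.2 < r.2 then init ++ [(last.1, r.2)] else init ++ [last])
      else init ++ [last] ++ [r] := by
  simp [mergeStep]

-- every start in the merged list comes from the old list or from r
lemma mergeStep_starts (merged : List (Int × Int)) (r : Int × Int) :
    ∀ p ∈ mergeStep merged r, p.1 = r.1 ∨ ∃ q ∈ merged, p.1 = q.1 := by
  rcases List.eq_nil_or_concat merged with h | ⟨init, last, h⟩ <;>
    [skip; rw [List.concat_eq_append] at h] <;> subst h
  · intro p hp; rw [mergeStep_nil] at hp; simp at hp; simp [hp]
  · intro p hp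
    rw [mergeStep_concat] at hp
    split_ifs at hp with h1 h2
    · rcases List.mem_append.mp hp with h | h
      · exact Or.inr ⟨p, List.mem_append_left _ h, rfl⟩
      · simp at h
        exact Or.inr ⟨last, List.mem_append_right _ (by simp), by simp [h]⟩
    · exact Or.inr ⟨p, hp, rfl⟩
    · rcases List.mem_append.mp hp with h | h
      · exact Or.inr ⟨p, h, rfl⟩
      · simp at h; simp [h]

-- one merge step preserves the union, provided r starts no earlier than anything merged
lemma mergeStep_any (merged : List (Int × Int)) (r : Int × Int) (x : Int)
    (hle : ∀ p ∈ merged, p.1 ≤ r.1) :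
    (mergeStep merged r).any (hitB x) = (merged.any (hitB x) || hitB x r) := by
  rcases List.eq_nil_or_concat merged with h | ⟨init, last, h⟩ <;>
    [skip; rw [List.concat_eq_append] at h] <;> subst h
  · simp [mergeStep_nil]
  · have hls : last.1 ≤ r.1 := hle last (by simp)
    rw [mergeStep_concat]
    split_ifs with h1 h2
    · -- coalesce, extend the end
      simp only [List.any_append, List.any_cons, List.any_nil, Bool.or_false, Bool.or_assoc]
      cases hi : init.any (hitB x)
      · simp only [Bool.false_or]
        rw [Bool.eq_iff_iff]
        simp only [Bool.or_eq_true, hitB, decide_eq_true_eq]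
        omega
      · simp
    · -- r is contained in the last interval
      have himp : hitB x r = true → hitB x last = true := by
        simp only [hitB, decide_eq_true_eq]
        omega
      simp only [List.any_append, List.any_cons, List.any_nil, Bool.or_false]
      cases hr : hitB x r
      · simp
      · simp [himp hr]
    · -- disjoint, append
      simp [List.any_append, Bool.or_assoc]

-- folding the merge over a start-sorted list preserves the union
lemma foldl_mergeStep_any (l : List (Int × Int)) (x : Int) :
    ∀ merged, l.Pairwise (fun a b => a.1 ≤ b.1) →
      (∀ p ∈ merged, ∀ q ∈ l, p.1 ≤ q.1) →
      (l.foldl mergeStep merged).any (hitB x) = (merged.any (hitB x) || l.any (hitB x)) := by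
  induction l with
  | nil => intro merged _ _; simp
  | cons r t ih =>
    intro merged hpw hle
    have hhead : ∀ q ∈ t, r.1 ≤ q.1 := (List.pairwise_cons.mp hpw).1
    have hle' : ∀ p ∈ mergeStep merged r, ∀ q ∈ t, p.1 ≤ q.1 := by
      intro p hp q hq
      rcases mergeStep_starts merged r p hp with h | ⟨q', hq', h⟩
      · rw [h]; exact hhead q hq
      · rw [h]; exact hle q' hq' q (List.mem_cons_of_mem _ hq)
    have hler : ∀ p ∈ merged, p.1 ≤ r.1 := fun p hp => hle p hp r List.mem_cons_self
    simp only [List.foldl_cons]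
    rw [ih (mergeStep merged r) (List.pairwise_cons.mp hpw).2 hle', mergeStep_any merged r x hler]
    simp [Bool.or_assoc]

lemma merged_any_eq (product_ranges : List (Int × Int)) (x : Int) :
    ((PySem.List.sorted product_ranges (fun r => r.1) false).foldl mergeStep []).any (hitB x)
      = product_ranges.any (hitB x) := by
  rw [foldl_mergeStep_any _ x [] (PySem.List.sorted_pairwise _ _) (by simp)]
  simp only [List.any_nil, Bool.false_or]
  have hperm := PySem.List.sorted_perm product_ranges (fun r => r.1) false
  rw [Bool.eq_iff_iff]
  simp only [List.any_eq_true]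
  exact ⟨fun ⟨a, ha, h⟩ => ⟨a, hperm.mem_iff.mp ha, h⟩,
         fun ⟨a, ha, h⟩ => ⟨a, hperm.mem_iff.mpr ha, h⟩⟩

-- ===== VERDICT (by name: the statement is the Claim_ definition above) =====
theorem part1_spec : Claim_equal_part1 := by
  intro product_ranges products _
  unfold Spec_part1 part1 part1_alt
  simp only []
  apply PySem.List.foldl_congr_mem
  intro acc x _
  have hfun : (fun r : Int × Int => decide (r.1 ≤ x ∧ x ≤ r.2)) = hitB x := rfl
  rw [part1Inner_eq, hfun, merged_any_eq]
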